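-- pv_equiv track=rewrite | github.com/R2bEEaton/Advent-of-Code | 2021/10b.py | closesearch
-- ===== SOURCE A (Python) =====
-- openers = ["<", "[", "(", "{"]
--
-- closers = [">", "]", ")", "}"]
--
-- score = {")": 3, "]": 57, "}": 1197, ">": 25137}
--
-- incomplete = []
--
-- def closesearch(line):
--     orig = line
--     old = "."
--     while old != line:
--         old = line
--         line = line.replace("()", "")
--         line = line.replace("[]", "")
--         line = line.replace("{}", "")
--         line = line.replace("<>", "")
--
--     for i in range(len(line) - 1):
--         if line[i] in openers and line[i + 1] in closers:
--             return score[line[i + 1]]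
--     incomplete.append(orig)
--     return 0
-- ===== SOURCE B (Python) =====
-- # Single-pass stack matcher instead of A's repeated-replace fixpoint + adjacency scan.
-- # Side effect preserved: appends the line to the global `incomplete` when no corrupt pair is found.
-- openers = ["<", "[", "(", "{"]
--
-- closers = [">", "]", ")", "}"]
--
-- score = {")": 3, "]": 57, "}": 1197, ">": 25137}
--
-- pairs = {")": "(", "]": "[", "}": "{", ">": "<"}
--
-- incomplete = []
--
-- def closesearch(line):
--     stack = []
--     for c in line:
--         if c in closers and stack:
--             t = stack[-1]
--             if t == pairs[c]:
--                 stack.pop()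
--                 continue
--             if t in openers:
--                 return score[c]
--         stack.append(c)
--     incomplete.append(line)
--     return 0
-- ===== Notes on version B (the rewrite author's own statement) =====
-- stated objective: alternative
-- what changed: Replaces A's repeated str.replace-until-fixpoint pass plus adjacency rescan with a single left-to-right stack pass that pops matching bracket pairs and returns the score at the first closer sitting on a non-matching opener.
import Mathlib
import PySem

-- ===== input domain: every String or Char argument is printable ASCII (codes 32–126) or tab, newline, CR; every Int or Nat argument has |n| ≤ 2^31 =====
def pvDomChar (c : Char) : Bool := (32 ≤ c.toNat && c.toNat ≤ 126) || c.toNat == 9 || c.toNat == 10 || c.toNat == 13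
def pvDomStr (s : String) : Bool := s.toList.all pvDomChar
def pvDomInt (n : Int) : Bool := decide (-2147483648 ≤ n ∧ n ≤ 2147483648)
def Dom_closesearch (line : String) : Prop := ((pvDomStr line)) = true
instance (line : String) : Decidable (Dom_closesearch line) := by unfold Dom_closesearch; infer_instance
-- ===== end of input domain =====

-- B replaces A's repeated-replace fixpoint + adjacency scan by a single left-to-right stack pass
-- (a different algorithm); both programs append to the module-level `incomplete` list on the
-- return-0 path (identical side effect); the theorems below are about the return value.

-- ===== PORT A =====
def openersL : List Char := ['<', '[', '(', '{']
def closersL : List Char := ['>', ']', ')', '}']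
def scoreD : PySem.Dict Char Int := PySem.Dict.ofList [(')', 3), (']', 57), ('}', 1197), ('>', 25137)]

-- the four `line = line.replace(pat, "")` of one while-iteration, in A's order
def pvRepA (l : List Char) : List Char :=
  let l1 := PySem.Chars.replace l ['(', ')'] []
  let l2 := PySem.Chars.replace l1 ['[', ']'] []
  let l3 := PySem.Chars.replace l2 ['{', '}'] []
  PySem.Chars.replace l3 ['<', '>'] []

-- the `while old != line` loop; fuel (length + 1) is a totality guard only — the loop body
-- strictly shortens the string whenever it continues, so the fuel is never exhausted
def pvLoopA : Nat → List Char → List Char → List Char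
  | 0, _, line => line
  | n + 1, old, line => if old = line then line else pvLoopA n line (pvRepA line)

-- the `for i in range(len(line)-1)` scan; `score[line[i+1]]` is guarded by membership in
-- closers, so the dict lookup always succeeds and `getD 0` is exact
def pvScanA : List Char → Int
  | a :: b :: t => if a ∈ openersL ∧ b ∈ closersL then (scoreD.get? b).getD 0 else pvScanA (b :: t)
  | _ => 0

def closesearch (line : String) : Int :=
  pvScanA (pvLoopA (line.toList.length + 1) ['.'] line.toList)

-- ===== PORT B =====
def pairsD : PySem.Dict Char Char := PySem.Dict.ofList [(')', '('), (']', '['), ('}', '{'), ('>', '<')]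

-- B's `for c in line` loop; the Lean stack is head-first (head = Python's stack[-1]);
-- `pairs[c]` is guarded by `c in closers`, so `getD '?'` is exact
def altRun : List Char → List Char → Int
  | _, [] => 0
  | [], c :: rest => altRun [c] rest
  | t :: st, c :: rest =>
    if c ∈ closersL then
      if t = (pairsD.get? c).getD '?' then altRun st rest
      else if t ∈ openersL then (scoreD.get? c).getD 0
      else altRun (c :: t :: st) rest
    else altRun (c :: t :: st) rest

def closesearch_alt (line : String) : Int := altRun [] line.toList

-- ===== PRECONDITION & SPEC =====
def Spec_closesearch (line : String) (out : Int) : Prop := out = closesearch_alt line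
instance (line : String) (out : Int) : Decidable (Spec_closesearch line out) := by unfold Spec_closesearch; infer_instance

-- ===== CLAIM (what is proved, stated in full; the proofs are below) =====
def Claim_equal_closesearch : Prop := ∀ (line : String), Dom_closesearch line → Spec_closesearch line (closesearch line)

-- ===== LEMMAS AND PROOFS =====

-- B's pass, instrumented for the proof: it also returns the final stack when no score is hit
def pvStep : List Char → List Char → (List Char) ⊕ Int
  | st, [] => .inl st
  | [], c :: rest => pvStep [c] rest
  | t :: st, c :: rest =>
    if c ∈ closersL then
      if t = (pairsD.get? c).getD '?' then pvStep st rest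
      else if t ∈ openersL then .inr ((scoreD.get? c).getD 0)
      else pvStep (c :: t :: st) rest
    else pvStep (c :: t :: st) rest

-- `a` is the matching opener of closer `b` (the pairs A's replaces delete)
def pvMatched (a b : Char) : Prop := b ∈ closersL ∧ a = (pairsD.get? b).getD '?'

theorem altRun_eq_step (s st : List Char) :
    altRun st s = (pvStep st s).elim (fun _ => 0) id := by
  induction s generalizing st with
  | nil => cases st <;> rfl
  | cons c rest ih =>
    cases st with
    | nil => simpa [altRun, pvStep] using ih [c]
    | cons t st =>
      by_cases hc : c ∈ closersL
      · by_cases hp : t = (pairsD.get? c).getD '?'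
        · simpa [altRun, pvStep, hc, hp] using ih st
        · by_cases ho : t ∈ openersL
          · simp [altRun, pvStep, hc, hp, ho]
          · simpa [altRun, pvStep, hc, hp, ho] using ih (c :: t :: st)
      · simpa [altRun, pvStep, hc] using ih (c :: t :: st)

theorem step_append (u : List Char) (st v : List Char) :
    pvStep st (u ++ v) = (pvStep st u).elim (fun st' => pvStep st' v) .inr := by
  induction u generalizing st with
  | nil => cases st <;> rfl
  | cons c rest ih =>
    cases st with
    | nil => simpa [pvStep] using ih [c]
    | cons t st =>
      by_cases hc : c ∈ closersL
      · by_cases hp : t = (pairsD.get? c).getD '?'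
        · simpa [pvStep, hc, hp] using ih st
        · by_cases ho : t ∈ openersL
          · simp [pvStep, hc, hp, ho]
          · simpa [pvStep, hc, hp, ho] using ih (c :: t :: st)
      · simpa [pvStep, hc] using ih (c :: t :: st)

theorem matched_cases {a b : Char} (h : pvMatched a b) :
    ([a, b] = ['(', ')'] ∨ [a, b] = ['[', ']'] ∨ [a, b] = ['{', '}'] ∨ [a, b] = ['<', '>']) := by
  obtain ⟨hb, ha⟩ := h
  subst ha
  simp [closersL] at hb
  rcases hb with h | h | h | h <;> subst h <;> decide

theorem step_cancel {a b : Char} (h : pvMatched a b) (st v : List Char) :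
    pvStep st (a :: b :: v) = pvStep st v := by
  rcases matched_cases h with h | h | h | h <;>
    (injection h with h1 h2; injection h2 with h2 _; subst h1; subst h2; cases st <;> rfl)

-- the unfolding equations of PySem.Chars.replace.go (all rfl)
theorem go_zero (pat new l acc : List Char) :
    PySem.Chars.replace.go pat new 0 l acc = acc.reverse ++ l := rfl
theorem go_nil (pat new : List Char) (fuel : Nat) (acc : List Char) :
    PySem.Chars.replace.go pat new (fuel + 1) [] acc = acc.reverse := rfl
theorem go_cons (pat new : List Char) (fuel : Nat) (c : Char) (t acc : List Char) :
    PySem.Chars.replace.go pat new (fuel + 1) (c :: t) acc =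
      if pat.isPrefixOf (c :: t) = true then
        PySem.Chars.replace.go pat new fuel (List.drop pat.length (c :: t)) (new.reverse ++ acc)
      else PySem.Chars.replace.go pat new fuel t (c :: acc) := rfl

theorem go_length_le (pat : List Char) (fuel : Nat) (l acc : List Char) :
    (PySem.Chars.replace.go pat [] fuel l acc).length ≤ acc.length + l.length := by
  induction fuel generalizing l acc with
  | zero => simp [go_zero]
  | succ n ih =>
    cases l with
    | nil => simp [go_nil]
    | cons c t =>
      rw [go_cons]
      by_cases hp : pat.isPrefixOf (c :: t) = true
      · rw [if_pos hp]; simp only [List.reverse_nil, List.nil_append]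
        have h1 := ih (List.drop pat.length (c :: t)) acc
        have h2 : (List.drop pat.length (c :: t)).length ≤ (c :: t).length := by
          simp [List.length_drop]
        omega
      · rw [if_neg hp]
        have h1 := ih t (c :: acc)
        simp at h1 ⊢
        omega

theorem go_eq_or_lt (pat : List Char) (hpat : pat ≠ []) (fuel : Nat) (l acc : List Char) :
    PySem.Chars.replace.go pat [] fuel l acc = acc.reverse ++ l ∨
      (PySem.Chars.replace.go pat [] fuel l acc).length < acc.length + l.length := by
  induction fuel generalizing l acc with
  | zero => left; simp [go_zero]
  | succ n ih =>
    cases l with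
    | nil => left; simp [go_nil]
    | cons c t =>
      rw [go_cons]
      by_cases hp : pat.isPrefixOf (c :: t) = true
      · right
        rw [if_pos hp]; simp only [List.reverse_nil, List.nil_append]
        have hple : pat.length ≤ (c :: t).length :=
          (List.isPrefixOf_iff_prefix.mp hp).length_le
        have h0 : 0 < pat.length := List.length_pos_iff.mpr hpat
        have h1 := go_length_le pat n (List.drop pat.length (c :: t)) acc
        have h2 : (List.drop pat.length (c :: t)).length = (c :: t).length - pat.length := by
          simp [List.length_drop]
        simp at h1 h2 ⊢
        omega
      · rw [if_neg hp]
        rcases ih t (c :: acc) with h | h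
        · left; simp [h]
        · right; simp at h ⊢; omega

theorem go_infix_lt (pat : List Char) (hpat : pat ≠ []) (fuel : Nat) (l acc : List Char)
    (hfuel : l.length ≤ fuel) (hinf : pat <:+: l) :
    (PySem.Chars.replace.go pat [] fuel l acc).length < acc.length + l.length := by
  induction fuel generalizing l acc with
  | zero =>
    have : l = [] := by
      cases l with
      | nil => rfl
      | cons c t => simp at hfuel
    exact absurd (List.eq_nil_of_infix_nil (this ▸ hinf)) hpat
  | succ n ih =>
    cases l with
    | nil => exact absurd (List.eq_nil_of_infix_nil hinf) hpat
    | cons c t =>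
      rw [go_cons]
      by_cases hp : pat.isPrefixOf (c :: t) = true
      · rw [if_pos hp]; simp only [List.reverse_nil, List.nil_append]
        have hple : pat.length ≤ (c :: t).length :=
          (List.isPrefixOf_iff_prefix.mp hp).length_le
        have h0 : 0 < pat.length := List.length_pos_iff.mpr hpat
        have h1 := go_length_le pat n (List.drop pat.length (c :: t)) acc
        have h2 : (List.drop pat.length (c :: t)).length = (c :: t).length - pat.length := by
          simp [List.length_drop]
        simp at h1 h2 ⊢
        omega
      · have ht : pat <:+: t := by
          rcases List.infix_cons_iff.mp hinf with h | h
          · exact absurd (List.isPrefixOf_iff_prefix.mpr h) hp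
          · exact h
        have h1 := ih t (c :: acc) (by simp at hfuel ⊢; omega) ht
        rw [if_neg hp]
        simp at h1 ⊢
        omega

theorem go_step {a b : Char} (h : pvMatched a b) (fuel : Nat) (l acc st : List Char) :
    pvStep st (PySem.Chars.replace.go [a, b] [] fuel l acc) = pvStep st (acc.reverse ++ l) := by
  induction fuel generalizing l acc with
  | zero => rw [go_zero]
  | succ n ih =>
    cases l with
    | nil => rw [go_nil]; simp
    | cons c t =>
      rw [go_cons]
      by_cases hp : List.isPrefixOf [a, b] (c :: t) = true
      · obtain ⟨t', ht'⟩ := List.isPrefixOf_iff_prefix.mp hp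
        have hc : c = a ∧ t = b :: t' := by
          cases ht'; simp_all
        obtain ⟨rfl, rfl⟩ := hc
        rw [if_pos hp]
        simp only [List.reverse_nil, List.nil_append, List.drop_succ_cons, List.drop_zero,
          List.length_cons, List.length_nil]
        rw [ih t' acc, step_append, step_append]
        cases pvStep st acc.reverse with
        | inl st' => simp [step_cancel h]
        | inr v => simp
      · rw [if_neg hp, ih t (c :: acc)]
        simp

theorem replace_step {a b : Char} (h : pvMatched a b) (l st : List Char) :
    pvStep st (PySem.Chars.replace l [a, b] []) = pvStep st l := by
  have heq : PySem.Chars.replace l [a, b] [] = PySem.Chars.replace.go [a, b] [] l.length l [] := rfl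
  rw [heq, go_step h]; simp

theorem replace_eq_or_lt (pat : List Char) (hpat : pat ≠ []) (l : List Char) :
    PySem.Chars.replace l pat [] = l ∨ (PySem.Chars.replace l pat []).length < l.length := by
  have hne : pat.isEmpty = false := by simpa [List.isEmpty_iff] using hpat
  have heq : PySem.Chars.replace l pat [] = PySem.Chars.replace.go pat [] l.length l [] := by
    simp [PySem.Chars.replace, hne]
  rw [heq]
  simpa using go_eq_or_lt pat hpat l.length l []

theorem replace_len_le (pat : List Char) (hpat : pat ≠ []) (l : List Char) :
    (PySem.Chars.replace l pat []).length ≤ l.length := by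
  rcases replace_eq_or_lt pat hpat l with h | h
  · exact le_of_eq (congrArg List.length h)
  · exact le_of_lt h

theorem replace_eq_no_infix (pat : List Char) (hpat : pat ≠ []) (l : List Char)
    (h : PySem.Chars.replace l pat [] = l) : ¬ pat <:+: l := by
  intro hinf
  have hne : pat.isEmpty = false := by simpa [List.isEmpty_iff] using hpat
  have heq : PySem.Chars.replace l pat [] = PySem.Chars.replace.go pat [] l.length l [] := by
    simp [PySem.Chars.replace, hne]
  have hlt := go_infix_lt pat hpat l.length l [] le_rfl hinf
  rw [← heq, h] at hlt
  simp at hlt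

theorem repA_def (l : List Char) : pvRepA l =
    PySem.Chars.replace (PySem.Chars.replace (PySem.Chars.replace
      (PySem.Chars.replace l ['(', ')'] []) ['[', ']'] []) ['{', '}'] []) ['<', '>'] [] := rfl

theorem repA_step (l st : List Char) : pvStep st (pvRepA l) = pvStep st l := by
  rw [repA_def, replace_step ⟨by decide, by decide⟩, replace_step ⟨by decide, by decide⟩,
    replace_step ⟨by decide, by decide⟩, replace_step ⟨by decide, by decide⟩]

theorem repA_ne_lt (l : List Char) (h : pvRepA l ≠ l) : (pvRepA l).length < l.length := by
  rw [repA_def] at h ⊢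
  by_cases e1 : PySem.Chars.replace l ['(', ')'] [] = l
  · rw [e1] at h ⊢
    by_cases e2 : PySem.Chars.replace l ['[', ']'] [] = l
    · rw [e2] at h ⊢
      by_cases e3 : PySem.Chars.replace l ['{', '}'] [] = l
      · rw [e3] at h ⊢
        rcases replace_eq_or_lt ['<', '>'] (by decide) l with h4 | h4
        · exact absurd h4 h
        · exact h4
      · have h3 : (PySem.Chars.replace l ['{', '}'] []).length < l.length := by
          rcases replace_eq_or_lt ['{', '}'] (by decide) l with h3 | h3
          · exact absurd h3 e3
          · exact h3
        have h4 := replace_len_le ['<', '>'] (by decide) (PySem.Chars.replace l ['{', '}'] [])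
        omega
    · have h2 : (PySem.Chars.replace l ['[', ']'] []).length < l.length := by
        rcases replace_eq_or_lt ['[', ']'] (by decide) l with h2 | h2
        · exact absurd h2 e2
        · exact h2
      have h3 := replace_len_le ['{', '}'] (by decide) (PySem.Chars.replace l ['[', ']'] [])
      have h4 := replace_len_le ['<', '>'] (by decide)
        (PySem.Chars.replace (PySem.Chars.replace l ['[', ']'] []) ['{', '}'] [])
      omega
  · have h1 : (PySem.Chars.replace l ['(', ')'] []).length < l.length := by
      rcases replace_eq_or_lt ['(', ')'] (by decide) l with h1 | h1
      · exact absurd h1 e1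
      · exact h1
    have h2 := replace_len_le ['[', ']'] (by decide) (PySem.Chars.replace l ['(', ')'] [])
    have h3 := replace_len_le ['{', '}'] (by decide)
      (PySem.Chars.replace (PySem.Chars.replace l ['(', ')'] []) ['[', ']'] [])
    have h4 := replace_len_le ['<', '>'] (by decide)
      (PySem.Chars.replace (PySem.Chars.replace (PySem.Chars.replace l ['(', ')'] []) ['[', ']'] []) ['{', '}'] [])
    omega

theorem repA_fix_no_infix (l : List Char) (h : pvRepA l = l) {a b : Char}
    (hm : pvMatched a b) : ¬ [a, b] <:+: l := by
  have hd : PySem.Chars.replace (PySem.Chars.replace (PySem.Chars.replace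
      (PySem.Chars.replace l ['(', ')'] []) ['[', ']'] []) ['{', '}'] []) ['<', '>'] [] = l := by
    rw [← repA_def]; exact h
  have e1 : PySem.Chars.replace l ['(', ')'] [] = l := by
    rcases replace_eq_or_lt ['(', ')'] (by decide) l with h1 | h1
    · exact h1
    · exfalso
      have b2 := replace_len_le ['[', ']'] (by decide) (PySem.Chars.replace l ['(', ')'] [])
      have b3 := replace_len_le ['{', '}'] (by decide)
        (PySem.Chars.replace (PySem.Chars.replace l ['(', ')'] []) ['[', ']'] [])
      have b4 := replace_len_le ['<', '>'] (by decide)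
        (PySem.Chars.replace (PySem.Chars.replace (PySem.Chars.replace l ['(', ')'] []) ['[', ']'] []) ['{', '}'] [])
      have hlen := congrArg List.length hd
      simp only at hlen
      omega
  rw [e1] at hd
  have e2 : PySem.Chars.replace l ['[', ']'] [] = l := by
    rcases replace_eq_or_lt ['[', ']'] (by decide) l with h2 | h2
    · exact h2
    · exfalso
      have b3 := replace_len_le ['{', '}'] (by decide) (PySem.Chars.replace l ['[', ']'] [])
      have b4 := replace_len_le ['<', '>'] (by decide)
        (PySem.Chars.replace (PySem.Chars.replace l ['[', ']'] []) ['{', '}'] [])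
      have hlen := congrArg List.length hd
      simp only at hlen
      omega
  rw [e2] at hd
  have e3 : PySem.Chars.replace l ['{', '}'] [] = l := by
    rcases replace_eq_or_lt ['{', '}'] (by decide) l with h3 | h3
    · exact h3
    · exfalso
      have b4 := replace_len_le ['<', '>'] (by decide) (PySem.Chars.replace l ['{', '}'] [])
      have hlen := congrArg List.length hd
      simp only at hlen
      omega
  rw [e3] at hd
  rcases matched_cases hm with hab | hab | hab | hab <;> rw [hab]
  · exact replace_eq_no_infix _ (by decide) l e1
  · exact replace_eq_no_infix _ (by decide) l e2
  · exact replace_eq_no_infix _ (by decide) l e3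
  · exact replace_eq_no_infix _ (by decide) l hd

theorem loop_self (n : Nat) (l : List Char) : pvLoopA n l l = l := by
  cases n <;> simp [pvLoopA]

theorem loop_main (n : Nat) (old line : List Char) (hfuel : line.length < n)
    (hold : old = line → pvRepA line = line) :
    pvStep [] (pvLoopA n old line) = pvStep [] line ∧
      pvRepA (pvLoopA n old line) = pvLoopA n old line := by
  induction n generalizing old line with
  | zero => omega
  | succ n ih =>
    by_cases he : old = line
    · simp [pvLoopA, he, hold he]
    · rw [pvLoopA, if_neg he]
      by_cases hr : pvRepA line = line
      · rw [hr, loop_self]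
        exact ⟨rfl, hr⟩
      · have hlt : (pvRepA line).length < line.length := repA_ne_lt line hr
        have hmain := ih line (pvRepA line) (by omega) (fun h => absurd h.symm hr)
        exact ⟨hmain.1.trans (repA_step line []), hmain.2⟩

def pvHd : List Char → List Char
  | [] => []
  | t :: _ => [t]

-- the boundary obligation run_scan threads through: the char just pushed cannot match the
-- next input char, because they are adjacent in the (matched-pair-free) input
theorem pvBoundary (c : Char) (X rest : List Char)
    (hadj : ∀ a b : Char, [a, b] <:+: c :: rest → ¬ pvMatched a b) :
    ∀ t d r, c :: X = t :: (c :: X).tail → rest = d :: r → ¬ pvMatched t d := by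
  intro t d r ht hr
  injection ht with ht _
  subst ht
  subst hr
  exact hadj c d ⟨[], r, rfl⟩

theorem run_scan (s st : List Char)
    (hadj : ∀ a b : Char, [a, b] <:+: s → ¬ pvMatched a b)
    (hbd : ∀ t c rest, st = t :: st.tail → s = c :: rest → ¬ pvMatched t c) :
    (pvStep st s).elim (fun _ => 0) id = pvScanA (pvHd st ++ s) := by
  induction s generalizing st with
  | nil => cases st <;> rfl
  | cons c rest ih =>
    have hadj' : ∀ a b : Char, [a, b] <:+: rest → ¬ pvMatched a b :=
      fun a b h => hadj a b (List.infix_cons_iff.mpr (Or.inr h))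
    cases st with
    | nil =>
      have hmain := ih [c] hadj' (pvBoundary c [] rest hadj)
      simpa [pvStep, pvHd] using hmain
    | cons t st =>
      by_cases hc : c ∈ closersL
      · by_cases hp : t = (pairsD.get? c).getD '?'
        · exact absurd ⟨hc, hp⟩ (hbd t c rest rfl rfl)
        · by_cases ho : t ∈ openersL
          · simp [pvStep, hc, hp, ho, pvHd, pvScanA]
          · have hmain := ih (c :: t :: st) hadj' (pvBoundary c (t :: st) rest hadj)
            rw [pvStep, if_pos hc, if_neg hp, if_neg ho, hmain]
            simp [pvHd, pvScanA, ho]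
      · have hmain := ih (c :: t :: st) hadj' (pvBoundary c (t :: st) rest hadj)
        rw [pvStep, if_neg hc, hmain]
        simp [pvHd, pvScanA, hc]

-- ===== VERDICT (by name: the statement is the Claim_ definition above) =====
theorem closesearch_spec : Claim_equal_closesearch := by
  intro line _
  unfold Spec_closesearch closesearch closesearch_alt
  have hmain := loop_main (line.toList.length + 1) ['.'] line.toList (by omega)
    (by intro h; rw [← h]; decide)
  have hscan := run_scan (pvLoopA (line.toList.length + 1) ['.'] line.toList) []
    (fun a b hinf hm => repA_fix_no_infix _ hmain.2 hm hinf)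
    (by intro t c rest ht _; simp at ht)
  rw [altRun_eq_step, ← hmain.1]
  simpa [pvHd] using hscan.symm
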